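-- pv_equiv track=rewrite | github.com/omri2927/mini_google_python_project | core/extractors.py | format_csv_row
-- ===== SOURCE A (Python) =====
-- from itertools import zip_longest
--
-- def format_csv_row(headers: list[str], row: list[str],
--                    case_sensitive: bool) -> str:
--     MISSING_HEADER = object()
--     parts = []
--
--     for i, (h, v) in enumerate(zip_longest(headers, row, fillvalue=MISSING_HEADER)):
--         h_display = h.strip()
--         if not case_sensitive:
--             h_display = h_display.casefold()
--         if v is MISSING_HEADER:
--             parts.append(f"{h_display}: ''")
--         elif h is MISSING_HEADER:
--             parts.append(f"col{i + 1}: {v.strip()}")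
--         else:
--             parts.append(f"{h_display}: {v.strip()}")
--
--     return " | ".join(parts)
-- ===== SOURCE B (Python) =====
-- def format_csv_row(headers: list[str], row: list[str],
--                    case_sensitive: bool) -> str:
--     # Pad-then-format: first normalize both columns to a common length n
--     # (synthetic "col{i+1}" names for missing headers, literal "''" for
--     # missing values), then format every pair uniformly with no branching.
--     n = max(len(headers), len(row))
--     names = [h.strip() if case_sensitive else h.strip().casefold()
--              for h in headers]
--     names += [f"col{i + 1}" for i in range(len(headers), n)]
--     vals = [v.strip() for v in row]
--     vals += ["''"] * (n - len(row))
--     return " | ".join(f"{name}: {val}" for name, val in zip(names, vals))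
-- ===== Notes on version B (the rewrite author's own statement) =====
-- stated objective: alternative
-- what changed: Instead of one sentinel-driven zip_longest loop with three branches, B first materializes two normalized equal-length columns (display names padded with synthetic col{i+1} labels, stripped values padded with the literal "''") and then formats every pair uniformly with a single branch-free zip/join.
import Mathlib
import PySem

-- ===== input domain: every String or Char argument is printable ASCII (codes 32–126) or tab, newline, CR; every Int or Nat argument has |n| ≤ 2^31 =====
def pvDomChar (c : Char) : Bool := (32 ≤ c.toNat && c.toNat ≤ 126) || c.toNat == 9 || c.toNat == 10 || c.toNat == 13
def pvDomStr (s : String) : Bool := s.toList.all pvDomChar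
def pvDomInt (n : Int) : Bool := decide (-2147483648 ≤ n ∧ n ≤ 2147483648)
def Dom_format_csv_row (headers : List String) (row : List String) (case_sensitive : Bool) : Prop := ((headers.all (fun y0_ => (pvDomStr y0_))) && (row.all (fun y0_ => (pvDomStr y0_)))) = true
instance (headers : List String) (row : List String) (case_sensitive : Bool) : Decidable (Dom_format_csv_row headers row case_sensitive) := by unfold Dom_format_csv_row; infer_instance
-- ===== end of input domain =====

-- B replaces A's sentinel-driven zip_longest loop by pad-then-format: two normalized
-- equal-length columns are built first, then every pair is formatted uniformly
-- (objective: alternative).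

-- ===== PORT A =====
-- zip_longest(headers, row, fillvalue=MISSING_HEADER); the sentinel is `none`.
def pvZipLongest : List String → List String → List (Option String × Option String)
  | [], [] => []
  | h :: hs, [] => (some h, none) :: pvZipLongest hs []
  | [], v :: vs => (none, some v) :: pvZipLongest [] vs
  | h :: hs, v :: vs => (some h, some v) :: pvZipLongest hs vs

-- one loop iteration: h.strip()/casefold, then the three branches in A's order.
-- In Python `h.strip()` on the sentinel raises AttributeError (outside Pre_);
-- here `getD ""` stands at that point, exact whenever `h` is a real string.
-- casefold is PySem.Str.lower, exact on the ASCII domain.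
def pvPartA (case_sensitive : Bool) (i : Nat) (p : Option String × Option String) : String :=
  let h_display := PySem.Str.strip (p.1.getD "")
  let h_display := if !case_sensitive then PySem.Str.lower h_display else h_display
  if p.2 = none then h_display ++ ": ''"
  else if p.1 = none then "col" ++ PySem.Int.toStr ((i : Int) + 1) ++ ": " ++ PySem.Str.strip (p.2.getD "")
  else h_display ++ ": " ++ PySem.Str.strip (p.2.getD "")

-- the `for i, (h, v) in enumerate(...)` loop building `parts`
def pvLoopA (case_sensitive : Bool) : Nat → List (Option String × Option String) → List String
  | _, [] => []
  | i, p :: rest => pvPartA case_sensitive i p :: pvLoopA case_sensitive (i + 1) rest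

def format_csv_row (headers : List String) (row : List String) (case_sensitive : Bool) : String :=
  PySem.Str.join " | " (pvLoopA case_sensitive 0 (pvZipLongest headers row))

-- ===== PORT B =====
-- the display name of a real header (casefold = PySem.Str.lower on ASCII)
def pvDispB (case_sensitive : Bool) (h : String) : String :=
  if case_sensitive then PySem.Str.strip h else PySem.Str.lower (PySem.Str.strip h)

def format_csv_row_alt (headers : List String) (row : List String) (case_sensitive : Bool) : String :=
  let n : Int := max (headers.length : Int) (row.length : Int)
  let names := headers.map (pvDispB case_sensitive)
    ++ (PySem.List.pyRange (headers.length : Int) n 1).map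
         (fun i => "col" ++ PySem.Int.toStr (i + 1))
  let vals := row.map PySem.Str.strip ++ List.replicate (n - (row.length : Int)).toNat "''"
  PySem.Str.join " | " ((names.zip vals).map (fun p => p.1 ++ ": " ++ p.2))

-- ===== PRECONDITION & SPEC =====
-- A calls .strip() on its fill sentinel whenever the row is longer than the headers
-- and raises AttributeError there; Pre_ excludes exactly those inputs.
def Pre_format_csv_row (headers : List String) (row : List String) (case_sensitive : Bool) : Prop :=
  row.length ≤ headers.length
instance (headers : List String) (row : List String) (case_sensitive : Bool) : Decidable (Pre_format_csv_row headers row case_sensitive) := by unfold Pre_format_csv_row; infer_instance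

def pvWitness_format_csv_row : List String × List String × Bool := ([" Name ", "Age"], ["bob "], false)

def Spec_format_csv_row (headers : List String) (row : List String) (case_sensitive : Bool) (out : String) : Prop := out = format_csv_row_alt headers row case_sensitive
instance (headers : List String) (row : List String) (case_sensitive : Bool) (out : String) : Decidable (Spec_format_csv_row headers row case_sensitive out) := by unfold Spec_format_csv_row; infer_instance

-- ===== CLAIM (what is proved, stated in full; the proofs are below) =====
def Claim_equal_format_csv_row : Prop := ∀ (headers : List String) (row : List String) (case_sensitive : Bool), Dom_format_csv_row headers row case_sensitive → Pre_format_csv_row headers row case_sensitive → Spec_format_csv_row headers row case_sensitive (format_csv_row headers row case_sensitive)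


-- ===== LEMMAS AND PROOFS =====

theorem pv_colon_quotes (s : String) : s ++ ": ''" = s ++ ": " ++ "''" := by
  rw [String.append_assoc]
  congr 1

-- the all-headers tail of A's loop versus B's padded columns
theorem pvLoopA_headers_tail (cs : Bool) (hs : List String) (i : Nat) :
    pvLoopA cs i (pvZipLongest hs []) =
      ((hs.map (pvDispB cs)).zip (List.replicate hs.length "''")).map
        (fun p => p.1 ++ ": " ++ p.2) := by
  induction hs generalizing i with
  | nil => simp [pvZipLongest, pvLoopA]
  | cons h hs ih =>
    simp [pvZipLongest, pvLoopA, pvPartA, pvDispB, ih]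
    cases cs <;> simp [List.replicate_succ, pv_colon_quotes]

-- A's loop equals B's zip of the padded columns whenever the row is not longer
theorem pvLoopA_eq_padded (cs : Bool) (hs rs : List String) (i : Nat)
    (hle : rs.length ≤ hs.length) :
    pvLoopA cs i (pvZipLongest hs rs) =
      ((hs.map (pvDispB cs)).zip
          (rs.map PySem.Str.strip ++ List.replicate (hs.length - rs.length) "''")).map
        (fun p => p.1 ++ ": " ++ p.2) := by
  induction hs generalizing rs i with
  | nil =>
    have : rs = [] := List.eq_nil_of_length_eq_zero (Nat.le_zero.mp (by simpa using hle))
    subst this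
    simp [pvZipLongest, pvLoopA]
  | cons h hs ih =>
    cases rs with
    | nil => simpa using pvLoopA_headers_tail cs (h :: hs) i
    | cons v vs =>
      have hle' : vs.length ≤ hs.length := by simpa using hle
      simp [pvZipLongest, pvLoopA, pvPartA, pvDispB, ih vs (i + 1) hle']
      cases cs <;> simp

-- ===== VERDICT (by name: the statement is the Claim_ definition above) =====
theorem format_csv_row_spec : Claim_equal_format_csv_row := by
  intro headers row cs _ hpre
  unfold Spec_format_csv_row format_csv_row format_csv_row_alt
  have hmax : max (headers.length : Int) (row.length : Int) = (headers.length : Int) :=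
    max_eq_left (by exact_mod_cast hpre)
  have hrange : PySem.List.pyRange (headers.length : Int) (headers.length : Int) 1 = [] :=
    PySem.List.pyRange_one_eq_nil le_rfl
  have hnat : ((headers.length : Int) - (row.length : Int)).toNat
      = headers.length - row.length := by omega
  simp only [hmax, hrange, hnat, List.map_nil, List.append_nil]
  rw [pvLoopA_eq_padded cs headers row 0 hpre]
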